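-- pv_equiv track=rewrite | github.com/ICodeForCoffee/SudokuSolver | SudokuVisualizer.py | generate_possible_values_html
-- ===== SOURCE A (Python) =====
-- import copy
--
-- POSSIBLE_VALUES = """
-- <table class="possibleValues">
-- <tr>
--     <td class="possibleValuesCell">x1</td>
--     <td class="possibleValuesCell">x2</td>
--     <td class="possibleValuesCell">x3</td>
-- </tr>
-- <tr>
--     <td class="possibleValuesCell">x4</td>
--     <td class="possibleValuesCell">x5</td>
--     <td class="possibleValuesCell">x6</td>
-- </tr>
-- <tr>
--     <td class="possibleValuesCell">x7</td>
--     <td class="possibleValuesCell">x8</td>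
--     <td class="possibleValuesCell">x9</td>
-- </tr>
-- </table>
-- """
--
-- def generate_possible_values_html(possible_values):
--     body_new = copy.deepcopy(POSSIBLE_VALUES)
--
--     for x in range(1,10):
--         cell = "x" + str(x)
--         if x in possible_values:
--             body_new = body_new.replace(cell, str(x))
--         else:
--             body_new = body_new.replace(cell, "&nbsp;")
--
--     return body_new
-- ===== SOURCE B (Python) =====
-- POSSIBLE_VALUES = """
-- <table class="possibleValues">
-- <tr>
--     <td class="possibleValuesCell">x1</td>
--     <td class="possibleValuesCell">x2</td>
--     <td class="possibleValuesCell">x3</td>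
-- </tr>
-- <tr>
--     <td class="possibleValuesCell">x4</td>
--     <td class="possibleValuesCell">x5</td>
--     <td class="possibleValuesCell">x6</td>
-- </tr>
-- <tr>
--     <td class="possibleValuesCell">x7</td>
--     <td class="possibleValuesCell">x8</td>
--     <td class="possibleValuesCell">x9</td>
-- </tr>
-- </table>
-- """
--
-- def generate_possible_values_html(possible_values):
--     # Single left-to-right scan over the template: expand each "x<digit>"
--     # placeholder on the fly instead of nine full .replace passes.
--     s = POSSIBLE_VALUES
--     n = len(s)
--     out = []
--     i = 0
--     while i < n:
--         c = s[i]
--         if c == 'x' and i + 1 < n and '1' <= s[i + 1] <= '9':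
--             d = ord(s[i + 1]) - ord('0')
--             out.append(s[i + 1] if d in possible_values else '&nbsp;')
--             i += 2
--         else:
--             out.append(c)
--             i += 1
--     return ''.join(out)
-- ===== Notes on version B (the rewrite author's own statement) =====
-- stated objective: alternative
-- what changed: B makes one left-to-right scan over the template, expanding each x<digit> placeholder in place, instead of A's nine sequential str.replace passes (and drops the no-op deepcopy).
import Mathlib
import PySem

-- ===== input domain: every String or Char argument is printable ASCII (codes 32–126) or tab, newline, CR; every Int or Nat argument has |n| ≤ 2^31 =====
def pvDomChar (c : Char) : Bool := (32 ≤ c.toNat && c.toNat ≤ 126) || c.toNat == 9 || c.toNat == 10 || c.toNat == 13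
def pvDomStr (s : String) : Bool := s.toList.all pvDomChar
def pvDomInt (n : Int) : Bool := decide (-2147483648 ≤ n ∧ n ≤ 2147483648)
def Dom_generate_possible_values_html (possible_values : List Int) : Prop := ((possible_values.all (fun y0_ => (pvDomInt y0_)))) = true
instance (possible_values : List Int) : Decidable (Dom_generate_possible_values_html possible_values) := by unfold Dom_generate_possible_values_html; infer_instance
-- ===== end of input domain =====

set_option maxRecDepth 40000
set_option maxHeartbeats 1000000

-- B replaces A's nine sequential str.replace passes over the template by one
-- left-to-right scan that expands each x<digit> placeholder in place (alternative, similar cost).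


-- the module constant POSSIBLE_VALUES
def pvTemplate : String := "\n<table class=\"possibleValues\">\n<tr>\n    <td class=\"possibleValuesCell\">x1</td>\n    <td class=\"possibleValuesCell\">x2</td>\n    <td class=\"possibleValuesCell\">x3</td>\n</tr>\n<tr>\n    <td class=\"possibleValuesCell\">x4</td>\n    <td class=\"possibleValuesCell\">x5</td>\n    <td class=\"possibleValuesCell\">x6</td>\n</tr>\n<tr>\n    <td class=\"possibleValuesCell\">x7</td>\n    <td class=\"possibleValuesCell\">x8</td>\n    <td class=\"possibleValuesCell\">x9</td>\n</tr>\n</table>\n"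

-- ===== PORT A =====
def generate_possible_values_html (possible_values : List Int) : String :=
  -- body_new = copy.deepcopy(POSSIBLE_VALUES)  (deepcopy of a str returns the same str)
  (PySem.List.pyRange 1 10 1).foldl
    (fun body_new x =>
      let cell := "x" ++ PySem.Int.toStr x
      if possible_values.contains x then
        PySem.Str.replace body_new cell (PySem.Int.toStr x)
      else
        PySem.Str.replace body_new cell "&nbsp;")
    pvTemplate

-- ===== PORT B =====
-- the while-loop of Source B as recursion over the remaining characters
def pvScanB (pv : List Int) : List Char → List Char
  | [] => []
  | [c] => [c]
  | c :: d :: rest =>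
      if c = 'x' ∧ '1' ≤ d ∧ d ≤ '9' then
        (if pv.contains ((d.toNat : Int) - 48) then [d] else "&nbsp;".toList) ++ pvScanB pv rest
      else c :: pvScanB pv (d :: rest)

def generate_possible_values_html_alt (possible_values : List Int) : String :=
  String.ofList (pvScanB possible_values pvTemplate.toList)

-- ===== PRECONDITION & SPEC =====
def Spec_generate_possible_values_html (possible_values : List Int) (out : String) : Prop := out = generate_possible_values_html_alt possible_values
instance (possible_values : List Int) (out : String) : Decidable (Spec_generate_possible_values_html possible_values out) := by unfold Spec_generate_possible_values_html; infer_instance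

-- ===== CLAIM (what is proved, stated in full; the proofs are below) =====
def Claim_equal_generate_possible_values_html : Prop := ∀ (possible_values : List Int), Dom_generate_possible_values_html possible_values → Spec_generate_possible_values_html possible_values (generate_possible_values_html possible_values)

-- ===== LEMMAS AND PROOFS =====

-- the template split at its nine placeholders: pvTemplate = seg1 ++ "x1" ++ seg2 ++ … ++ "x9" ++ seg10
def pvSeg1 : List Char := ("\n<table class=\"possibleValues\">\n<tr>\n    <td class=\"possibleValuesCell\">" : String).toList
def pvSeg2 : List Char := ("</td>\n    <td class=\"possibleValuesCell\">" : String).toList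
def pvSeg3 : List Char := ("</td>\n    <td class=\"possibleValuesCell\">" : String).toList
def pvSeg4 : List Char := ("</td>\n</tr>\n<tr>\n    <td class=\"possibleValuesCell\">" : String).toList
def pvSeg5 : List Char := ("</td>\n    <td class=\"possibleValuesCell\">" : String).toList
def pvSeg6 : List Char := ("</td>\n    <td class=\"possibleValuesCell\">" : String).toList
def pvSeg7 : List Char := ("</td>\n</tr>\n<tr>\n    <td class=\"possibleValuesCell\">" : String).toList
def pvSeg8 : List Char := ("</td>\n    <td class=\"possibleValuesCell\">" : String).toList
def pvSeg9 : List Char := ("</td>\n    <td class=\"possibleValuesCell\">" : String).toList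
def pvSeg10 : List Char := ("</td>\n</tr>\n</table>\n" : String).toList

-- pvV k = everything after the placeholder "x k"
def pvV9 : List Char := pvSeg10
def pvV8 : List Char := pvSeg9 ++ 'x' :: '9' :: pvV9
def pvV7 : List Char := pvSeg8 ++ 'x' :: '8' :: pvV8
def pvV6 : List Char := pvSeg7 ++ 'x' :: '7' :: pvV7
def pvV5 : List Char := pvSeg6 ++ 'x' :: '6' :: pvV6
def pvV4 : List Char := pvSeg5 ++ 'x' :: '5' :: pvV5
def pvV3 : List Char := pvSeg4 ++ 'x' :: '4' :: pvV4
def pvV2 : List Char := pvSeg3 ++ 'x' :: '3' :: pvV3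
def pvV1 : List Char := pvSeg2 ++ 'x' :: '2' :: pvV2
def pvV0 : List Char := pvSeg1 ++ 'x' :: '1' :: pvV1

-- what one placeholder becomes
def pvRep (b : Bool) (d : Char) : List Char := if b then [d] else "&nbsp;".toList

-- A's fold written out, as a function of the nine membership bits
def pvStepA (b : Bool) (x : Int) (body : String) : String :=
  let cell := "x" ++ PySem.Int.toStr x
  if b then PySem.Str.replace body cell (PySem.Int.toStr x)
  else PySem.Str.replace body cell "&nbsp;"

def pvFA (b1 b2 b3 b4 b5 b6 b7 b8 b9 : Bool) : String :=
  pvStepA b9 9 (pvStepA b8 8 (pvStepA b7 7 (pvStepA b6 6 (pvStepA b5 5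
    (pvStepA b4 4 (pvStepA b3 3 (pvStepA b2 2 (pvStepA b1 1 pvTemplate))))))))

theorem pvA_bits (pv : List Int) :
    generate_possible_values_html pv =
      pvFA (pv.contains 1) (pv.contains 2) (pv.contains 3) (pv.contains 4)
        (pv.contains 5) (pv.contains 6) (pv.contains 7) (pv.contains 8) (pv.contains 9) := rfl

-- ---- behaviour of PySem.Chars.replace.go ----
theorem go_nil (old new : List Char) (fuel : Nat) (acc : List Char) :
    PySem.Chars.replace.go old new fuel [] acc = acc.reverse := by
  cases fuel <;> rw [PySem.Chars.replace.go.eq_def] <;> simp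

theorem go_cons_no (old new : List Char) (fuel : Nat) (c : Char) (t acc : List Char)
    (h : old.isPrefixOf (c :: t) = false) :
    PySem.Chars.replace.go old new (fuel + 1) (c :: t) acc
      = PySem.Chars.replace.go old new fuel t (c :: acc) := by
  rw [PySem.Chars.replace.go.eq_def]; simp [h]

theorem go_cons_yes (old new : List Char) (fuel : Nat) (c : Char) (t acc : List Char)
    (h : old.isPrefixOf (c :: t) = true) :
    PySem.Chars.replace.go old new (fuel + 1) (c :: t) acc
      = PySem.Chars.replace.go old new fuel ((c :: t).drop old.length) (new.reverse ++ acc) := by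
  rw [PySem.Chars.replace.go.eq_def]; simp [h]

-- go walks untouched over a block that contains no 'x'
theorem go_skip (new : List Char) (d : Char) (u : List Char) (hu : 'x' ∉ u) :
    ∀ (fuel : Nat) (rest acc : List Char),
      PySem.Chars.replace.go ['x', d] new (u.length + fuel) (u ++ rest) acc
        = PySem.Chars.replace.go ['x', d] new fuel rest (u.reverse ++ acc) := by
  induction u with
  | nil => intro fuel rest acc; simp
  | cons c u' ih =>
      intro fuel rest acc
      have hc : c ≠ 'x' := fun h => hu (h ▸ List.mem_cons_self)
      have hpre : (['x', d] : List Char).isPrefixOf (c :: (u' ++ rest)) = false := by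
        simp [List.isPrefixOf]
        intro h; exact absurd h.symm hc
      have hlen : (c :: u').length + fuel = (u'.length + fuel) + 1 := by simp; omega
      rw [List.cons_append, hlen, go_cons_no _ _ _ _ _ _ hpre,
        ih (fun h => hu (List.mem_cons_of_mem _ h)) fuel rest (c :: acc)]
      simp

-- go leaves a block with no occurrence of the pattern untouched
theorem go_noocc (new : List Char) (d : Char) :
    ∀ (l : List Char), (∀ i, i < l.length → ¬ ['x', d] <+: l.drop i) →
      ∀ (fuel : Nat) (acc : List Char), l.length ≤ fuel →
        PySem.Chars.replace.go ['x', d] new fuel l acc = acc.reverse ++ l := by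
  intro l
  induction l with
  | nil => intro _ fuel acc _; simp [go_nil]
  | cons c t ih =>
      intro h fuel acc hfuel
      cases fuel with
      | zero => simp at hfuel
      | succ f =>
          have h0 : ¬ (['x', d] : List Char) <+: (c :: t) := by
            have := h 0 (by simp)
            simpa using this
          have hpre : (['x', d] : List Char).isPrefixOf (c :: t) = false := by
            rw [← Bool.not_eq_true, List.isPrefixOf_iff_prefix]; exact h0
          rw [go_cons_no _ _ _ _ _ _ hpre,
            ih (fun i hi => by simpa using h (i + 1) (by simpa using hi)) f (c :: acc)
              (by simp at hfuel; omega)]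
          simp

-- the central replace lemma: one isolated occurrence
theorem replace_single (u v new : List Char) (d : Char) (hu : 'x' ∉ u)
    (hv : ∀ i, i < v.length → ¬ ['x', d] <+: v.drop i) :
    PySem.Chars.replace (u ++ 'x' :: d :: v) ['x', d] new = u ++ new ++ v := by
  rw [PySem.Chars.replace]
  rw [if_neg (by simp)]
  have hlen : (u ++ 'x' :: d :: v).length = u.length + (v.length + 1 + 1) := by
    simp
    try omega
  have hpre : (['x', d] : List Char).isPrefixOf ('x' :: d :: v) = true := by
    simp [List.isPrefixOf]
  rw [hlen, go_skip new d u hu _ _ [], go_cons_yes _ _ _ _ _ _ hpre]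
  simp only [List.length_cons, List.length_nil, List.drop_succ_cons, List.drop_zero]
  rw [go_noocc new d v hv _ _ (by omega)]
  simp

-- one replace step of A at the string level
theorem stepA_eq (b : Bool) (k : Int) (d : Char) (u v : List Char)
    (hcell : ("x" ++ PySem.Int.toStr k).toList = ['x', d])
    (hres : (PySem.Int.toStr k).toList = [d])
    (hu : 'x' ∉ u)
    (hv : ∀ i, i < v.length → ¬ ['x', d] <+: v.drop i) :
    pvStepA b k (String.ofList (u ++ 'x' :: d :: v)) = String.ofList (u ++ pvRep b d ++ v) := by
  cases b <;>
    simp only [pvStepA, pvRep, if_true, if_false, Bool.false_eq_true, PySem.Str.replace,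
      String.toList_ofList, hcell, hres] <;>
    rw [replace_single u v _ d hu hv]

-- ---- behaviour of B's scan ----
theorem scanB_nil (pv : List Int) : pvScanB pv [] = [] := rfl

theorem scanB_skip (pv : List Int) (u : List Char) (hu : 'x' ∉ u) (rest : List Char) :
    pvScanB pv (u ++ rest) = u ++ pvScanB pv rest := by
  induction u with
  | nil => simp
  | cons c u' ih =>
      have hc : c ≠ 'x' := fun h => hu (h ▸ List.mem_cons_self)
      have ih' := ih (fun h => hu (List.mem_cons_of_mem _ h))
      cases hct : u' ++ rest with
      | nil =>
          rcases List.append_eq_nil_iff.mp hct with ⟨h1, h2⟩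
          subst h1; subst h2; rfl
      | cons e t =>
          rw [List.cons_append, hct, pvScanB, if_neg (by intro h; exact hc h.1), ← hct, ih']
          rfl

theorem scanB_hit (pv : List Int) (d : Char) (h1 : '1' ≤ d) (h9 : d ≤ '9') (rest : List Char) :
    pvScanB pv ('x' :: d :: rest) = pvRep (pv.contains ((d.toNat : Int) - 48)) d ++ pvScanB pv rest := by
  rw [pvScanB, if_pos ⟨rfl, h1, h9⟩]; rfl

-- no further occurrence of "xk" after placeholder k (concrete checks)
theorem pv_hv1 : ∀ i, i < pvV1.length → ¬ ['x', '1'] <+: pvV1.drop i := by decide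
theorem pv_hv2 : ∀ i, i < pvV2.length → ¬ ['x', '2'] <+: pvV2.drop i := by decide
theorem pv_hv3 : ∀ i, i < pvV3.length → ¬ ['x', '3'] <+: pvV3.drop i := by decide
theorem pv_hv4 : ∀ i, i < pvV4.length → ¬ ['x', '4'] <+: pvV4.drop i := by decide
theorem pv_hv5 : ∀ i, i < pvV5.length → ¬ ['x', '5'] <+: pvV5.drop i := by decide
theorem pv_hv6 : ∀ i, i < pvV6.length → ¬ ['x', '6'] <+: pvV6.drop i := by decide
theorem pv_hv7 : ∀ i, i < pvV7.length → ¬ ['x', '7'] <+: pvV7.drop i := by decide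
theorem pv_hv8 : ∀ i, i < pvV8.length → ¬ ['x', '8'] <+: pvV8.drop i := by decide
theorem pv_hv9 : ∀ i, i < pvV9.length → ¬ ['x', '9'] <+: pvV9.drop i := by decide

theorem pv_seg1_x : 'x' ∉ pvSeg1 := by decide
theorem pv_seg2_x : 'x' ∉ pvSeg2 := by decide
theorem pv_seg3_x : 'x' ∉ pvSeg3 := by decide
theorem pv_seg4_x : 'x' ∉ pvSeg4 := by decide
theorem pv_seg5_x : 'x' ∉ pvSeg5 := by decide
theorem pv_seg6_x : 'x' ∉ pvSeg6 := by decide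
theorem pv_seg7_x : 'x' ∉ pvSeg7 := by decide
theorem pv_seg8_x : 'x' ∉ pvSeg8 := by decide
theorem pv_seg9_x : 'x' ∉ pvSeg9 := by decide
theorem pv_seg10_x : 'x' ∉ pvSeg10 := by decide

theorem pvNotMemApp {c : Char} {l1 l2 : List Char} (h1 : c ∉ l1) (h2 : c ∉ l2) : c ∉ l1 ++ l2 := by
  intro h; cases List.mem_append.mp h with
  | inl h => exact h1 h
  | inr h => exact h2 h

theorem pvNotMemRep {b : Bool} {d : Char} (h1 : 'x' ≠ d) : 'x' ∉ pvRep b d := by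
  cases b
  · simp [pvRep]
  · simpa [pvRep] using h1

-- A's nine replaces, step by step
theorem pvA_chain (b1 b2 b3 b4 b5 b6 b7 b8 b9 : Bool) :
    pvFA b1 b2 b3 b4 b5 b6 b7 b8 b9 =
      String.ofList (pvSeg1 ++ pvRep b1 '1' ++ pvSeg2 ++ pvRep b2 '2' ++ pvSeg3 ++ pvRep b3 '3'
        ++ pvSeg4 ++ pvRep b4 '4' ++ pvSeg5 ++ pvRep b5 '5' ++ pvSeg6 ++ pvRep b6 '6'
        ++ pvSeg7 ++ pvRep b7 '7' ++ pvSeg8 ++ pvRep b8 '8' ++ pvSeg9 ++ pvRep b9 '9' ++ pvSeg10) := by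
  have ht0 : pvTemplate.toList = pvSeg1 ++ 'x' :: '1' :: pvV1 := by decide
  have ht : pvTemplate = String.ofList (pvSeg1 ++ 'x' :: '1' :: pvV1) := by
    rw [← ht0, String.ofList_toList]
  have hu1 : 'x' ∉ pvSeg1 := pv_seg1_x
  have hu2 : 'x' ∉ (pvSeg1 ++ pvRep b1 '1' ++ pvSeg2) := pvNotMemApp (pvNotMemApp hu1 (pvNotMemRep (d := '1') (by decide))) pv_seg2_x
  have hu3 : 'x' ∉ (pvSeg1 ++ pvRep b1 '1' ++ pvSeg2 ++ pvRep b2 '2' ++ pvSeg3) := pvNotMemApp (pvNotMemApp hu2 (pvNotMemRep (d := '2') (by decide))) pv_seg3_x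
  have hu4 : 'x' ∉ (pvSeg1 ++ pvRep b1 '1' ++ pvSeg2 ++ pvRep b2 '2' ++ pvSeg3 ++ pvRep b3 '3' ++ pvSeg4) := pvNotMemApp (pvNotMemApp hu3 (pvNotMemRep (d := '3') (by decide))) pv_seg4_x
  have hu5 : 'x' ∉ (pvSeg1 ++ pvRep b1 '1' ++ pvSeg2 ++ pvRep b2 '2' ++ pvSeg3 ++ pvRep b3 '3' ++ pvSeg4 ++ pvRep b4 '4' ++ pvSeg5) := pvNotMemApp (pvNotMemApp hu4 (pvNotMemRep (d := '4') (by decide))) pv_seg5_x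
  have hu6 : 'x' ∉ (pvSeg1 ++ pvRep b1 '1' ++ pvSeg2 ++ pvRep b2 '2' ++ pvSeg3 ++ pvRep b3 '3' ++ pvSeg4 ++ pvRep b4 '4' ++ pvSeg5 ++ pvRep b5 '5' ++ pvSeg6) := pvNotMemApp (pvNotMemApp hu5 (pvNotMemRep (d := '5') (by decide))) pv_seg6_x
  have hu7 : 'x' ∉ (pvSeg1 ++ pvRep b1 '1' ++ pvSeg2 ++ pvRep b2 '2' ++ pvSeg3 ++ pvRep b3 '3' ++ pvSeg4 ++ pvRep b4 '4' ++ pvSeg5 ++ pvRep b5 '5' ++ pvSeg6 ++ pvRep b6 '6' ++ pvSeg7) := pvNotMemApp (pvNotMemApp hu6 (pvNotMemRep (d := '6') (by decide))) pv_seg7_x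
  have hu8 : 'x' ∉ (pvSeg1 ++ pvRep b1 '1' ++ pvSeg2 ++ pvRep b2 '2' ++ pvSeg3 ++ pvRep b3 '3' ++ pvSeg4 ++ pvRep b4 '4' ++ pvSeg5 ++ pvRep b5 '5' ++ pvSeg6 ++ pvRep b6 '6' ++ pvSeg7 ++ pvRep b7 '7' ++ pvSeg8) := pvNotMemApp (pvNotMemApp hu7 (pvNotMemRep (d := '7') (by decide))) pv_seg8_x
  have hu9 : 'x' ∉ (pvSeg1 ++ pvRep b1 '1' ++ pvSeg2 ++ pvRep b2 '2' ++ pvSeg3 ++ pvRep b3 '3' ++ pvSeg4 ++ pvRep b4 '4' ++ pvSeg5 ++ pvRep b5 '5' ++ pvSeg6 ++ pvRep b6 '6' ++ pvSeg7 ++ pvRep b7 '7' ++ pvSeg8 ++ pvRep b8 '8' ++ pvSeg9) := pvNotMemApp (pvNotMemApp hu8 (pvNotMemRep (d := '8') (by decide))) pv_seg9_x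
  have hs1 := stepA_eq b1 1 '1' (pvSeg1) pvV1 (by decide) (by decide) hu1 pv_hv1
  have hs2 := stepA_eq b2 2 '2' (pvSeg1 ++ pvRep b1 '1' ++ pvSeg2) pvV2 (by decide) (by decide) hu2 pv_hv2
  have hs3 := stepA_eq b3 3 '3' (pvSeg1 ++ pvRep b1 '1' ++ pvSeg2 ++ pvRep b2 '2' ++ pvSeg3) pvV3 (by decide) (by decide) hu3 pv_hv3
  have hs4 := stepA_eq b4 4 '4' (pvSeg1 ++ pvRep b1 '1' ++ pvSeg2 ++ pvRep b2 '2' ++ pvSeg3 ++ pvRep b3 '3' ++ pvSeg4) pvV4 (by decide) (by decide) hu4 pv_hv4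
  have hs5 := stepA_eq b5 5 '5' (pvSeg1 ++ pvRep b1 '1' ++ pvSeg2 ++ pvRep b2 '2' ++ pvSeg3 ++ pvRep b3 '3' ++ pvSeg4 ++ pvRep b4 '4' ++ pvSeg5) pvV5 (by decide) (by decide) hu5 pv_hv5
  have hs6 := stepA_eq b6 6 '6' (pvSeg1 ++ pvRep b1 '1' ++ pvSeg2 ++ pvRep b2 '2' ++ pvSeg3 ++ pvRep b3 '3' ++ pvSeg4 ++ pvRep b4 '4' ++ pvSeg5 ++ pvRep b5 '5' ++ pvSeg6) pvV6 (by decide) (by decide) hu6 pv_hv6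
  have hs7 := stepA_eq b7 7 '7' (pvSeg1 ++ pvRep b1 '1' ++ pvSeg2 ++ pvRep b2 '2' ++ pvSeg3 ++ pvRep b3 '3' ++ pvSeg4 ++ pvRep b4 '4' ++ pvSeg5 ++ pvRep b5 '5' ++ pvSeg6 ++ pvRep b6 '6' ++ pvSeg7) pvV7 (by decide) (by decide) hu7 pv_hv7
  have hs8 := stepA_eq b8 8 '8' (pvSeg1 ++ pvRep b1 '1' ++ pvSeg2 ++ pvRep b2 '2' ++ pvSeg3 ++ pvRep b3 '3' ++ pvSeg4 ++ pvRep b4 '4' ++ pvSeg5 ++ pvRep b5 '5' ++ pvSeg6 ++ pvRep b6 '6' ++ pvSeg7 ++ pvRep b7 '7' ++ pvSeg8) pvV8 (by decide) (by decide) hu8 pv_hv8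
  have hs9 := stepA_eq b9 9 '9' (pvSeg1 ++ pvRep b1 '1' ++ pvSeg2 ++ pvRep b2 '2' ++ pvSeg3 ++ pvRep b3 '3' ++ pvSeg4 ++ pvRep b4 '4' ++ pvSeg5 ++ pvRep b5 '5' ++ pvSeg6 ++ pvRep b6 '6' ++ pvSeg7 ++ pvRep b7 '7' ++ pvSeg8 ++ pvRep b8 '8' ++ pvSeg9) pvV9 (by decide) (by decide) hu9 pv_hv9
  have he1 : (pvSeg1) ++ pvRep b1 '1' ++ pvV1 = (pvSeg1 ++ pvRep b1 '1' ++ pvSeg2) ++ 'x' :: '2' :: pvV2 := by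
    simp [pvV1, List.append_assoc]
  have he2 : (pvSeg1 ++ pvRep b1 '1' ++ pvSeg2) ++ pvRep b2 '2' ++ pvV2 = (pvSeg1 ++ pvRep b1 '1' ++ pvSeg2 ++ pvRep b2 '2' ++ pvSeg3) ++ 'x' :: '3' :: pvV3 := by
    simp [pvV2, List.append_assoc]
  have he3 : (pvSeg1 ++ pvRep b1 '1' ++ pvSeg2 ++ pvRep b2 '2' ++ pvSeg3) ++ pvRep b3 '3' ++ pvV3 = (pvSeg1 ++ pvRep b1 '1' ++ pvSeg2 ++ pvRep b2 '2' ++ pvSeg3 ++ pvRep b3 '3' ++ pvSeg4) ++ 'x' :: '4' :: pvV4 := by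
    simp [pvV3, List.append_assoc]
  have he4 : (pvSeg1 ++ pvRep b1 '1' ++ pvSeg2 ++ pvRep b2 '2' ++ pvSeg3 ++ pvRep b3 '3' ++ pvSeg4) ++ pvRep b4 '4' ++ pvV4 = (pvSeg1 ++ pvRep b1 '1' ++ pvSeg2 ++ pvRep b2 '2' ++ pvSeg3 ++ pvRep b3 '3' ++ pvSeg4 ++ pvRep b4 '4' ++ pvSeg5) ++ 'x' :: '5' :: pvV5 := by
    simp [pvV4, List.append_assoc]
  have he5 : (pvSeg1 ++ pvRep b1 '1' ++ pvSeg2 ++ pvRep b2 '2' ++ pvSeg3 ++ pvRep b3 '3' ++ pvSeg4 ++ pvRep b4 '4' ++ pvSeg5) ++ pvRep b5 '5' ++ pvV5 = (pvSeg1 ++ pvRep b1 '1' ++ pvSeg2 ++ pvRep b2 '2' ++ pvSeg3 ++ pvRep b3 '3' ++ pvSeg4 ++ pvRep b4 '4' ++ pvSeg5 ++ pvRep b5 '5' ++ pvSeg6) ++ 'x' :: '6' :: pvV6 := by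
    simp [pvV5, List.append_assoc]
  have he6 : (pvSeg1 ++ pvRep b1 '1' ++ pvSeg2 ++ pvRep b2 '2' ++ pvSeg3 ++ pvRep b3 '3' ++ pvSeg4 ++ pvRep b4 '4' ++ pvSeg5 ++ pvRep b5 '5' ++ pvSeg6) ++ pvRep b6 '6' ++ pvV6 = (pvSeg1 ++ pvRep b1 '1' ++ pvSeg2 ++ pvRep b2 '2' ++ pvSeg3 ++ pvRep b3 '3' ++ pvSeg4 ++ pvRep b4 '4' ++ pvSeg5 ++ pvRep b5 '5' ++ pvSeg6 ++ pvRep b6 '6' ++ pvSeg7) ++ 'x' :: '7' :: pvV7 := by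
    simp [pvV6, List.append_assoc]
  have he7 : (pvSeg1 ++ pvRep b1 '1' ++ pvSeg2 ++ pvRep b2 '2' ++ pvSeg3 ++ pvRep b3 '3' ++ pvSeg4 ++ pvRep b4 '4' ++ pvSeg5 ++ pvRep b5 '5' ++ pvSeg6 ++ pvRep b6 '6' ++ pvSeg7) ++ pvRep b7 '7' ++ pvV7 = (pvSeg1 ++ pvRep b1 '1' ++ pvSeg2 ++ pvRep b2 '2' ++ pvSeg3 ++ pvRep b3 '3' ++ pvSeg4 ++ pvRep b4 '4' ++ pvSeg5 ++ pvRep b5 '5' ++ pvSeg6 ++ pvRep b6 '6' ++ pvSeg7 ++ pvRep b7 '7' ++ pvSeg8) ++ 'x' :: '8' :: pvV8 := by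
    simp [pvV7, List.append_assoc]
  have he8 : (pvSeg1 ++ pvRep b1 '1' ++ pvSeg2 ++ pvRep b2 '2' ++ pvSeg3 ++ pvRep b3 '3' ++ pvSeg4 ++ pvRep b4 '4' ++ pvSeg5 ++ pvRep b5 '5' ++ pvSeg6 ++ pvRep b6 '6' ++ pvSeg7 ++ pvRep b7 '7' ++ pvSeg8) ++ pvRep b8 '8' ++ pvV8 = (pvSeg1 ++ pvRep b1 '1' ++ pvSeg2 ++ pvRep b2 '2' ++ pvSeg3 ++ pvRep b3 '3' ++ pvSeg4 ++ pvRep b4 '4' ++ pvSeg5 ++ pvRep b5 '5' ++ pvSeg6 ++ pvRep b6 '6' ++ pvSeg7 ++ pvRep b7 '7' ++ pvSeg8 ++ pvRep b8 '8' ++ pvSeg9) ++ 'x' :: '9' :: pvV9 := by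
    simp [pvV8, List.append_assoc]
  rw [pvFA, ht, hs1, he1, hs2, he2, hs3, he3, hs4, he4, hs5, he5, hs6, he6, hs7, he7, hs8, he8, hs9]
  simp [pvV9, List.append_assoc]

-- B's scan, segment by segment
theorem pvB_chain (pv : List Int) :
    generate_possible_values_html_alt pv =
      String.ofList (pvSeg1 ++ (pvRep (pv.contains 1) '1' ++ (pvSeg2 ++ (pvRep (pv.contains 2) '2'
        ++ (pvSeg3 ++ (pvRep (pv.contains 3) '3' ++ (pvSeg4 ++ (pvRep (pv.contains 4) '4'
        ++ (pvSeg5 ++ (pvRep (pv.contains 5) '5' ++ (pvSeg6 ++ (pvRep (pv.contains 6) '6'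
        ++ (pvSeg7 ++ (pvRep (pv.contains 7) '7' ++ (pvSeg8 ++ (pvRep (pv.contains 8) '8'
        ++ (pvSeg9 ++ (pvRep (pv.contains 9) '9' ++ pvSeg10)))))))))))))))))) := by
  have ht : pvTemplate.toList = pvSeg1 ++ 'x' :: '1' :: pvV1 := by decide
  rw [generate_possible_values_html_alt, ht]
  rw [scanB_skip pv pvSeg1 pv_seg1_x, scanB_hit pv '1' (by decide) (by decide)]
  rw [show pvV1 = pvSeg2 ++ 'x' :: '2' :: pvV2 from rfl]
  rw [scanB_skip pv pvSeg2 pv_seg2_x, scanB_hit pv '2' (by decide) (by decide)]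
  rw [show pvV2 = pvSeg3 ++ 'x' :: '3' :: pvV3 from rfl]
  rw [scanB_skip pv pvSeg3 pv_seg3_x, scanB_hit pv '3' (by decide) (by decide)]
  rw [show pvV3 = pvSeg4 ++ 'x' :: '4' :: pvV4 from rfl]
  rw [scanB_skip pv pvSeg4 pv_seg4_x, scanB_hit pv '4' (by decide) (by decide)]
  rw [show pvV4 = pvSeg5 ++ 'x' :: '5' :: pvV5 from rfl]
  rw [scanB_skip pv pvSeg5 pv_seg5_x, scanB_hit pv '5' (by decide) (by decide)]
  rw [show pvV5 = pvSeg6 ++ 'x' :: '6' :: pvV6 from rfl]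
  rw [scanB_skip pv pvSeg6 pv_seg6_x, scanB_hit pv '6' (by decide) (by decide)]
  rw [show pvV6 = pvSeg7 ++ 'x' :: '7' :: pvV7 from rfl]
  rw [scanB_skip pv pvSeg7 pv_seg7_x, scanB_hit pv '7' (by decide) (by decide)]
  rw [show pvV7 = pvSeg8 ++ 'x' :: '8' :: pvV8 from rfl]
  rw [scanB_skip pv pvSeg8 pv_seg8_x, scanB_hit pv '8' (by decide) (by decide)]
  rw [show pvV8 = pvSeg9 ++ 'x' :: '9' :: pvV9 from rfl]
  rw [scanB_skip pv pvSeg9 pv_seg9_x, scanB_hit pv '9' (by decide) (by decide)]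
  have h10 : pvScanB pv pvV9 = pvSeg10 := by
    have h := scanB_skip pv pvSeg10 pv_seg10_x []
    simpa [pvV9, scanB_nil] using h
  rw [h10]
  rw [show (('1'.toNat : Int) - 48) = 1 from by decide]
  rw [show (('2'.toNat : Int) - 48) = 2 from by decide]
  rw [show (('3'.toNat : Int) - 48) = 3 from by decide]
  rw [show (('4'.toNat : Int) - 48) = 4 from by decide]
  rw [show (('5'.toNat : Int) - 48) = 5 from by decide]
  rw [show (('6'.toNat : Int) - 48) = 6 from by decide]
  rw [show (('7'.toNat : Int) - 48) = 7 from by decide]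
  rw [show (('8'.toNat : Int) - 48) = 8 from by decide]
  rw [show (('9'.toNat : Int) - 48) = 9 from by decide]

-- ===== VERDICT (by name: the statement is the Claim_ definition above) =====
theorem generate_possible_values_html_spec : Claim_equal_generate_possible_values_html := by
  intro pv _
  unfold Spec_generate_possible_values_html
  rw [pvA_bits, pvA_chain, pvB_chain]
  simp [List.append_assoc]
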